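-- pv_equiv track=rewrite | github.com/DataScienceLab-HGW/Text2HBM2.0 | parser_subproc.py | remove_tags_from_parser_output_sentences
-- ===== SOURCE A (Python) =====
-- def remove_tags_from_parser_output_sentences(sentences_list):
--     #this function is intended to be used because of the fact
--     #that the parser works better when passing the same sentences once again
--     #but considering a proper whitespace
--     new_sentences = []
--     for sentence in sentences_list:
--         tokens = sentence.split(" ")# we get a sequence of tokens in the format word/TAG
--         new_sentence = " ".join([token.split("/")[0] for token in tokens])
--         new_sentences.append(new_sentence)
--
--     new_sentences_text = "\n".join(new_sentences)
--
--     return new_sentences_text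
-- ===== SOURCE B (Python) =====
-- def _strip_tags(sentence):
--     # single left-to-right scan: a '/' starts skipping until the next space
--     out = []
--     skipping = False
--     for ch in sentence:
--         if ch == ' ':
--             skipping = False
--             out.append(ch)
--         elif ch == '/':
--             skipping = True
--         elif not skipping:
--             out.append(ch)
--     return ''.join(out)
--
--
-- def remove_tags_from_parser_output_sentences(sentences_list):
--     return "\n".join(_strip_tags(sentence) for sentence in sentences_list)
-- ===== Notes on version B (the rewrite author's own statement) =====
-- stated objective: simpler
-- what changed: Replaced the per-sentence tokenize (split(' ')), per-token split('/')[0] and ' '.join reconstruction with a single character scan per sentence that copies characters, drops from each '/' to the next space, and keeps a one-bit skipping state; no token list is ever built.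
import Mathlib
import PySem

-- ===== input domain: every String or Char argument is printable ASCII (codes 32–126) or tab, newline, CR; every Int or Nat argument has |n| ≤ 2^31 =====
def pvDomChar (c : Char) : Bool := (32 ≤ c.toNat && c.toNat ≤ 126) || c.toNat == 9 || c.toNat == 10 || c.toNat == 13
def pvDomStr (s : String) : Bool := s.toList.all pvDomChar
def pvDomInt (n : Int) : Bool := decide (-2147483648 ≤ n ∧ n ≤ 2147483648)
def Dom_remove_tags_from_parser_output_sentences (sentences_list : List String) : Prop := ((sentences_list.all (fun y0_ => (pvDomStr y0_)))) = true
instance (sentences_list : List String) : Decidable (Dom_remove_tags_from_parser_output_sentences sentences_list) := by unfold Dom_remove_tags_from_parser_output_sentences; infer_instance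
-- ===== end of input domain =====

-- B replaces the tokenize / split('/')[0] / rejoin pipeline with one character scan
-- per sentence (drop from each '/' to the next space); objective: simpler, same cost.

-- ===== PORT A =====
-- A: for each sentence, tokens = sentence.split(" "); new_sentence = " ".join(token.split("/")[0] ...);
-- collect into new_sentences; return "\n".join(new_sentences).
def remove_tags_from_parser_output_sentences (sentences_list : List String) : String :=
  let new_sentences :=
    sentences_list.foldl
      (fun (acc : List (List Char)) sentence =>
        let tokens := PySem.Chars.splitOn sentence.toList [' ']
        let new_sentence :=
          PySem.Chars.join [' ']
            (tokens.map (fun token =>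
              -- token.split("/")[0]: split on '/' is always nonempty, so [0] is the head
              match PySem.Chars.splitOn token ['/'] with
              | p :: _ => p
              | [] => []))
        acc ++ [new_sentence])
      []
  String.ofList (PySem.Chars.join ['\n'] new_sentences)

-- ===== PORT B =====
-- B's per-sentence scan: out/skipping accumulator, exactly Source B's loop.
def pvStripTags (cs : List Char) : List Char :=
  (cs.foldl
    (fun (st : List Char × Bool) ch =>
      if ch = ' ' then (st.1 ++ [ch], false)
      else if ch = '/' then (st.1, true)
      else if st.2 then st
      else (st.1 ++ [ch], st.2))
    ([], false)).1

def remove_tags_from_parser_output_sentences_alt (sentences_list : List String) : String :=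
  String.ofList
    (PySem.Chars.join ['\n'] (sentences_list.map (fun sentence => pvStripTags sentence.toList)))

-- ===== PRECONDITION & SPEC =====
def Spec_remove_tags_from_parser_output_sentences (sentences_list : List String) (out : String) : Prop := out = remove_tags_from_parser_output_sentences_alt sentences_list
instance (sentences_list : List String) (out : String) : Decidable (Spec_remove_tags_from_parser_output_sentences sentences_list out) := by unfold Spec_remove_tags_from_parser_output_sentences; infer_instance

-- ===== CLAIM (what is proved, stated in full; the proofs are below) =====
def Claim_equal_remove_tags_from_parser_output_sentences : Prop := ∀ (sentences_list : List String), Dom_remove_tags_from_parser_output_sentences sentences_list → Spec_remove_tags_from_parser_output_sentences sentences_list (remove_tags_from_parser_output_sentences sentences_list)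

-- ===== LEMMAS AND PROOFS =====

-- A clean recursion computing split-on-one-character (proof-side model of PySem.Chars.splitOn · [s]).
def pvSplit1 (s : Char) : List Char → List (List Char)
  | [] => [[]]
  | c :: r =>
      if c = s then [] :: pvSplit1 s r
      else
        match pvSplit1 s r with
        | p :: ps => (c :: p) :: ps
        | [] => [[c]]

theorem pvSplit1_ne_nil (s : Char) (l : List Char) : pvSplit1 s l ≠ [] := by
  induction l with
  | nil => simp [pvSplit1]
  | cons c r ih =>
      simp only [pvSplit1]
      split
      · simp
      · cases h : pvSplit1 s r with
        | nil => simp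
        | cons p ps => simp

-- head of pvSplit1 is takeWhile (≠ s)
theorem pvSplit1_head (s : Char) (l : List Char) :
    (match pvSplit1 s l with | p :: _ => p | [] => []) = l.takeWhile (fun c => !(c == s)) := by
  induction l with
  | nil => simp [pvSplit1]
  | cons c r ih =>
      simp only [pvSplit1]
      by_cases hc : c = s
      · simp [hc, List.takeWhile]
      · simp only [if_neg hc]
        cases h : pvSplit1 s r with
        | nil => exact absurd h (pvSplit1_ne_nil s r)
        | cons p ps =>
            rw [h] at ih
            have hb : (!(c == s)) = true := by simp [hc]
            simp [List.takeWhile_cons, hb, ih]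

def pvPrepCur (cur : List Char) : List (List Char) → List (List Char)
  | p :: ps => (cur ++ p) :: ps
  | [] => []

theorem pvGo_spec (s : Char) (fuel : Nat) :
    ∀ (l cur : List Char) (acc : List (List Char)), l.length < fuel →
      PySem.Chars.splitOn.go [s] fuel l cur acc =
        acc.reverse ++ pvPrepCur cur.reverse (pvSplit1 s l) := by
  induction fuel with
  | zero => intro l cur acc h; omega
  | succ f ih =>
      intro l cur acc h
      cases l with
      | nil =>
          simp [PySem.Chars.splitOn.go, pvSplit1, pvPrepCur]
      | cons c rest =>
          rw [PySem.Chars.splitOn.go]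
          simp only [List.length_cons] at h
          by_cases hc : c = s
          · have hpre : List.isPrefixOf [s] (c :: rest) = true := by
              simp [List.isPrefixOf, hc]
            rw [if_pos hpre]
            simp only [List.length_singleton, List.drop_succ_cons, List.drop_zero]
            rw [ih rest [] (cur.reverse :: acc) (by omega)]
            simp only [pvSplit1, if_pos hc, pvPrepCur, List.reverse_cons, List.reverse_nil,
              List.nil_append]
            cases hS : pvSplit1 s rest with
            | nil => exact absurd hS (pvSplit1_ne_nil s rest)
            | cons p ps => simp [pvPrepCur]
          · have hpre : List.isPrefixOf [s] (c :: rest) = false := by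
              simp [List.isPrefixOf]
              exact fun h => absurd h.symm hc
            rw [if_neg (by simp [hpre])]
            rw [ih rest (c :: cur) acc (by omega)]
            simp only [pvSplit1, if_neg hc, List.reverse_cons]
            cases hS : pvSplit1 s rest with
            | nil => exact absurd hS (pvSplit1_ne_nil s rest)
            | cons p ps => simp [pvPrepCur]

theorem pvSplitOn_eq (s : Char) (l : List Char) :
    PySem.Chars.splitOn l [s] = pvSplit1 s l := by
  show PySem.Chars.splitOn.go [s] (l.length + 1) l [] [] = pvSplit1 s l
  rw [pvGo_spec s (l.length + 1) l [] [] (by omega)]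
  cases hS : pvSplit1 s l with
  | nil => exact absurd hS (pvSplit1_ne_nil s l)
  | cons p ps => simp [pvPrepCur]

-- Recursive model of B's scan.
def pvScan : Bool → List Char → List Char
  | _, [] => []
  | sk, c :: r =>
      if c = ' ' then ' ' :: pvScan false r
      else if c = '/' then pvScan true r
      else if sk then pvScan sk r
      else c :: pvScan false r

theorem pvStripTags_fold (cs : List Char) :
    ∀ (out : List Char) (sk : Bool),
      (cs.foldl
        (fun (st : List Char × Bool) ch =>
          if ch = ' ' then (st.1 ++ [ch], false)
          else if ch = '/' then (st.1, true)
          else if st.2 then st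
          else (st.1 ++ [ch], st.2))
        (out, sk)).1 = out ++ pvScan sk cs := by
  induction cs with
  | nil => intro out sk; simp [pvScan]
  | cons c r ih =>
      intro out sk
      simp only [List.foldl_cons, pvScan]
      by_cases h1 : c = ' '
      · simp [h1, ih]
      · by_cases h2 : c = '/'
        · simp [h1, h2, ih]
        · by_cases h3 : sk
          · simp [h1, h2, h3, ih]
          · simp [h1, h2, h3, ih]

theorem pvStripTags_eq (cs : List Char) : pvStripTags cs = pvScan false cs := by
  unfold pvStripTags
  rw [pvStripTags_fold cs [] false]
  simp

theorem pvJoin_cons_head (sep : List Char) (c : Char) (p : List Char) (ps : List (List Char)) :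
    PySem.Chars.join sep ((c :: p) :: ps) = c :: PySem.Chars.join sep (p :: ps) := by
  cases ps with
  | nil => simp [PySem.Chars.join_singleton]
  | cons q qs => simp [PySem.Chars.join_cons_cons]

def pvHd1 (t : List Char) : List Char := t.takeWhile (fun c => !(c == '/'))

-- main per-sentence lemma, both scan states at once
theorem pvMain (cs : List Char) :
    PySem.Chars.join [' '] ((pvSplit1 ' ' cs).map pvHd1) = pvScan false cs ∧
    PySem.Chars.join [' '] ([] :: ((pvSplit1 ' ' cs).drop 1).map pvHd1) = pvScan true cs := by
  induction cs with
  | nil =>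
      simp [pvSplit1, pvScan, pvHd1, PySem.Chars.join_singleton]
  | cons c r ih =>
      obtain ⟨ihF, ihT⟩ := ih
      cases hS : pvSplit1 ' ' r with
      | nil => exact absurd hS (pvSplit1_ne_nil ' ' r)
      | cons p ps =>
      rw [hS] at ihF ihT
      by_cases h1 : c = ' '
      · subst h1
        have hscanF : pvScan false (' ' :: r) = ' ' :: pvScan false r := by simp [pvScan]
        have hscanT : pvScan true (' ' :: r) = ' ' :: pvScan false r := by simp [pvScan]
        have hsplit : pvSplit1 ' ' (' ' :: r) = [] :: (p :: ps) := by simp [pvSplit1, hS]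
        have hj : PySem.Chars.join [' '] (([] : List Char) :: (p :: ps).map pvHd1)
            = ' ' :: pvScan false r := by
          rw [List.map_cons, PySem.Chars.join_cons_cons, ← List.map_cons, ihF]
          simp
        constructor
        · rw [hscanF, hsplit, List.map_cons]
          have : pvHd1 ([] : List Char) = [] := by simp [pvHd1]
          rw [this, hj]
        · rw [hscanT, hsplit, List.drop_succ_cons, List.drop_zero, hj]
      · by_cases h2 : c = '/'
        · subst h2
          have hscanF : pvScan false ('/' :: r) = pvScan true r := by simp [pvScan]
          have hscanT : pvScan true ('/' :: r) = pvScan true r := by simp [pvScan]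
          have hsplit : pvSplit1 ' ' ('/' :: r) = ('/' :: p) :: ps := by
            simp [pvSplit1, hS]
          have hhd : pvHd1 ('/' :: p) = [] := by
            simp [pvHd1, List.takeWhile_cons]
          simp only [List.drop_succ_cons, List.drop_zero] at ihT
          constructor
          · rw [hscanF, hsplit, List.map_cons, hhd, ← ihT]
          · rw [hscanT, hsplit, List.drop_succ_cons, List.drop_zero, ← ihT]
        · have hscanF : pvScan false (c :: r) = c :: pvScan false r := by
            simp [pvScan, h1, h2]
          have hscanT : pvScan true (c :: r) = pvScan true r := by
            simp [pvScan, h1, h2]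
          have hsplit : pvSplit1 ' ' (c :: r) = (c :: p) :: ps := by
            simp [pvSplit1, h1, hS]
          have hhd : pvHd1 (c :: p) = c :: pvHd1 p := by
            have hb : (!(c == '/')) = true := by simp [h2]
            simp [pvHd1, List.takeWhile_cons, hb]
          simp only [List.drop_succ_cons, List.drop_zero] at ihT
          constructor
          · rw [hscanF, hsplit, List.map_cons, hhd, pvJoin_cons_head, ← List.map_cons, ihF]
          · rw [hscanT, hsplit, List.drop_succ_cons, List.drop_zero, ← ihT]

theorem pvSentence_eq (cs : List Char) :
    PySem.Chars.join [' ']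
      ((PySem.Chars.splitOn cs [' ']).map (fun token =>
        match PySem.Chars.splitOn token ['/'] with
        | p :: _ => p
        | [] => [])) = pvStripTags cs := by
  rw [pvStripTags_eq, pvSplitOn_eq]
  have : ∀ t : List Char,
      (match PySem.Chars.splitOn t ['/'] with | p :: _ => p | [] => []) = pvHd1 t := by
    intro t; rw [pvSplitOn_eq]; exact pvSplit1_head '/' t
  simp only [this]
  exact (pvMain cs).1

theorem pvFoldl_snoc {α β : Type} (g : α → β) (l : List α) :
    ∀ init : List β, l.foldl (fun acc x => acc ++ [g x]) init = init ++ l.map g := by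
  induction l with
  | nil => intro init; simp
  | cons x xs ih => intro init; simp [ih]

-- ===== VERDICT (by name: the statement is the Claim_ definition above) =====
theorem remove_tags_from_parser_output_sentences_spec : Claim_equal_remove_tags_from_parser_output_sentences := by
  intro sentences_list _
  show remove_tags_from_parser_output_sentences sentences_list =
    remove_tags_from_parser_output_sentences_alt sentences_list
  unfold remove_tags_from_parser_output_sentences remove_tags_from_parser_output_sentences_alt
  rw [pvFoldl_snoc]
  simp only [List.nil_append]
  congr 1
  congr 1
  apply List.map_congr_left
  intro s _
  exact pvSentence_eq s.toList
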